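-- pv_equiv track=rewrite | github.com/Huangsu1178/tiktok_monitor | ui/pages/ai_report/ab_comparison_page.py | _resolve_group_label
-- ===== SOURCE A (Python) =====
-- def _resolve_group_label(videos: list, fallback: str) -> str:
--     usernames = []
--     for video in videos:
--         username = (video or {}).get("influencer_username", "")
--         if username and username not in usernames:
--             usernames.append(username)
--
--     if len(usernames) == 1:
--         return usernames[0]
--     return fallback
-- ===== SOURCE B (Python) =====
-- def _resolve_group_label(videos: list, fallback: str) -> str:
--     candidate = None
--     for video in videos:
--         username = (video or {}).get("influencer_username", "")
--         if not username:
--             continue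
--         if candidate is None:
--             candidate = username
--         elif username != candidate:
--             return fallback
--     return candidate if candidate is not None else fallback
-- ===== Notes on version B (the rewrite author's own statement) =====
-- stated objective: simpler
-- what changed: Replaces the accumulated dedup list plus final length check with a single scalar candidate and an early return to the fallback as soon as a second distinct non-empty username appears.
import Mathlib
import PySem

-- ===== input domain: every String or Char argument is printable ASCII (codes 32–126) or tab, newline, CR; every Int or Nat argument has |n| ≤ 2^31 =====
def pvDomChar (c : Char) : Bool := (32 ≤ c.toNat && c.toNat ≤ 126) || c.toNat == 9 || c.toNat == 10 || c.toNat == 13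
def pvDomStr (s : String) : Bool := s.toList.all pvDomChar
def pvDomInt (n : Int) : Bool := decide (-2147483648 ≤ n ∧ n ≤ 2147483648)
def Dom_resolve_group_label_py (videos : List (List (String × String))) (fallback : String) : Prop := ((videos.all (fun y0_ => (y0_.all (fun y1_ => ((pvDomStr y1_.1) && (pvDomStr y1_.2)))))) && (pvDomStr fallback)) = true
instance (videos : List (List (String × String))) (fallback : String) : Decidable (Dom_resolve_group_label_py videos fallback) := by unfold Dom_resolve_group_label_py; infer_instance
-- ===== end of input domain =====

-- B replaces A's dedup-list accumulation + final length check by a single candidate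
-- variable with an early return (objective: simpler).


-- ===== PORT A =====
-- A's loop: accumulate distinct non-empty usernames in order
def pvAStep (acc : List String) (video : List (String × String)) : List String :=
  let username := PySem.Dict.getD (PySem.Dict.mk (if video = [] then [] else video)) "influencer_username" ""
  if username ≠ "" ∧ username ∉ acc then acc ++ [username] else acc

def resolve_group_label_py (videos : List (List (String × String))) (fallback : String) : String :=
  let usernames := videos.foldl pvAStep []
  if usernames.length = 1 then usernames.headD fallback else fallback

-- ===== PORT B =====
-- B's loop: one candidate, early return of the fallback on a second distinct username
def pvBLoop (videos : List (List (String × String))) (cand : Option String) (fallback : String) : String :=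
  match videos with
  | [] => cand.getD fallback
  | video :: rest =>
    let username := PySem.Dict.getD (PySem.Dict.mk (if video = [] then [] else video)) "influencer_username" ""
    if username = "" then pvBLoop rest cand fallback
    else match cand with
      | none => pvBLoop rest (some username) fallback
      | some c => if username = c then pvBLoop rest cand fallback else fallback

def resolve_group_label_py_alt (videos : List (List (String × String))) (fallback : String) : String :=
  pvBLoop videos none fallback

-- ===== PRECONDITION & SPEC =====
def Spec_resolve_group_label_py (videos : List (List (String × String))) (fallback : String) (out : String) : Prop := out = resolve_group_label_py_alt videos fallback
instance (videos : List (List (String × String))) (fallback : String) (out : String) : Decidable (Spec_resolve_group_label_py videos fallback out) := by unfold Spec_resolve_group_label_py; infer_instance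

-- ===== CLAIM (what is proved, stated in full; the proofs are below) =====
def Claim_equal_resolve_group_label_py : Prop := ∀ (videos : List (List (String × String))) (fallback : String), Dom_resolve_group_label_py videos fallback → Spec_resolve_group_label_py videos fallback (resolve_group_label_py videos fallback)

-- ===== LEMMAS AND PROOFS =====

-- A's fold only ever appends to the accumulator
theorem pvA_append (videos : List (List (String × String))) (acc : List String) :
    ∃ t, videos.foldl pvAStep acc = acc ++ t := by
  induction videos generalizing acc with
  | nil => exact ⟨[], by simp⟩
  | cons v vs ih =>
    obtain ⟨t, ht⟩ := ih (pvAStep acc v)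
    unfold pvAStep at ht
    simp only [List.foldl_cons]
    by_cases h : (PySem.Dict.getD (PySem.Dict.mk (if v = [] then [] else v)) "influencer_username" "" ≠ "" ∧
        PySem.Dict.getD (PySem.Dict.mk (if v = [] then [] else v)) "influencer_username" "" ∉ acc)
    · refine ⟨PySem.Dict.getD (PySem.Dict.mk (if v = [] then [] else v)) "influencer_username" "" :: t, ?_⟩
      unfold pvAStep
      rw [if_pos h] at ht ⊢
      simpa using ht
    · refine ⟨t, ?_⟩
      unfold pvAStep
      rw [if_neg h] at ht ⊢
      exact ht

-- the accumulator's length never decreases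
theorem pvA_len (videos : List (List (String × String))) (acc : List String) :
    acc.length ≤ (videos.foldl pvAStep acc).length := by
  obtain ⟨t, ht⟩ := pvA_append videos acc
  simp [ht]

-- core correspondence: B's scalar state (cand) matches A's accumulator ([], or [c])
theorem pvKey (videos : List (List (String × String))) (cand : Option String) (fallback : String) :
    pvBLoop videos cand fallback =
      (let l := videos.foldl pvAStep (cand.elim [] (fun c => [c]));
       if l.length = 1 then l.headD fallback else fallback) := by
  induction videos generalizing cand with
  | nil =>
    cases cand with
    | none => simp [pvBLoop]
    | some c => simp [pvBLoop]
  | cons v vs ih =>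
    simp only [pvBLoop, List.foldl_cons]
    set u := PySem.Dict.getD (PySem.Dict.mk (if v = [] then [] else v)) "influencer_username" "" with hu
    by_cases h0 : u = ""
    · rw [if_pos h0]
      cases cand with
      | none =>
        rw [ih none]
        have : pvAStep [] v = [] := by unfold pvAStep; rw [← hu]; simp [h0]
        simp [this]
      | some c =>
        rw [ih (some c)]
        have : pvAStep [c] v = [c] := by unfold pvAStep; rw [← hu]; simp [h0]
        simp [this]
    · rw [if_neg h0]
      cases cand with
      | none =>
        rw [ih (some u)]
        have : pvAStep [] v = [u] := by unfold pvAStep; rw [← hu]; simp [h0]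
        simp [this]
      | some c =>
        change (if u = c then pvBLoop vs (some c) fallback else fallback) = _
        by_cases hc : u = c
        · rw [if_pos hc]
          rw [ih (some c)]
          have : pvAStep [c] v = [c] := by unfold pvAStep; rw [← hu]; simp [hc]
          simp [this]
        · rw [if_neg hc]
          have hstep : pvAStep [c] v = [c, u] := by
            unfold pvAStep; rw [← hu]; simp [h0, hc]
          have hlen : 2 ≤ (vs.foldl pvAStep [c, u]).length := pvA_len vs [c, u]
          simp only [Option.elim, hstep]
          rw [if_neg (by omega)]

-- ===== VERDICT (by name: the statement is the Claim_ definition above) =====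
theorem resolve_group_label_py_spec : Claim_equal_resolve_group_label_py := by
  intro videos fallback _
  unfold Spec_resolve_group_label_py resolve_group_label_py resolve_group_label_py_alt
  rw [pvKey videos none fallback]
  simp
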